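-- pv_equiv track=rewrite | github.com/BiSinger-SVS/BiSinger | utils/get_meta_m4_avg.py | slur_json_tg
-- ===== SOURCE A (Python) =====
-- def slur_json_tg(is_slur):
--     re = []
--     cur_lst = []
--     for idx, val in enumerate(is_slur):
--         if val == 1:
--             cur_lst.append(idx)
--             continue
--         if cur_lst:
--             re.append(cur_lst)
--             cur_lst = []
--         cur_lst.append(idx)
--     if cur_lst:
--         re.append(cur_lst)
--     return re
-- ===== SOURCE B (Python) =====
-- def slur_json_tg(is_slur):
--     n = len(is_slur)
--     starts = [i for i, v in enumerate(is_slur) if i == 0 or v != 1]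
--     ends = starts[1:] + [n]
--     return [list(range(s, e)) for s, e in zip(starts, ends)]
-- ===== Notes on version B (the rewrite author's own statement) =====
-- stated objective: alternative
-- what changed: Replaces A's single accumulate-and-flush loop over a mutable current-group list with a two-phase computation: first collect the run-start boundary positions, then slice each group as a range between consecutive boundaries.
import Mathlib
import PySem

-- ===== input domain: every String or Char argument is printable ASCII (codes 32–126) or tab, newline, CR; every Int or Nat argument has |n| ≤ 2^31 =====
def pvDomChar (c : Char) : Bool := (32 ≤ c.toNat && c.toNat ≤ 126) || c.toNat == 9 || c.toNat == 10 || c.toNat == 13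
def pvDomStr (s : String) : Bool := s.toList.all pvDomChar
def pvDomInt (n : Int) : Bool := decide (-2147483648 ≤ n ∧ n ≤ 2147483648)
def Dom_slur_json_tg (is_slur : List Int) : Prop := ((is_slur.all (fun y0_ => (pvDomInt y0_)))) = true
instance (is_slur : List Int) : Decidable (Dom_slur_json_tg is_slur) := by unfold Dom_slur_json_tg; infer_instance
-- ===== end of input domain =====

-- B replaces A's accumulate-and-flush loop with a two-phase build (boundary positions, then
-- ranges between consecutive boundaries); alternative decomposition, same value everywhere.

-- ===== PORT A =====
-- the loop body of A (state = (re, cur_lst), one enumerate pair per step)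
def pvStepA (st : List (List Int) × List Int) (p : Int × Int) : List (List Int) × List Int :=
  if p.2 == 1 then (st.1, st.2 ++ [p.1])
  else if st.2 ≠ [] then (st.1 ++ [st.2], [p.1])
  else (st.1, st.2 ++ [p.1])

def slur_json_tg (is_slur : List Int) : List (List Int) :=
  let st := (PySem.List.enumerate is_slur).foldl pvStepA ([], [])
  if st.2 ≠ [] then st.1 ++ [st.2] else st.1

-- ===== PORT B =====
def slur_json_tg_alt (is_slur : List Int) : List (List Int) :=
  let n : Int := is_slur.length
  let starts := ((PySem.List.enumerate is_slur).filter
      (fun p => p.1 == 0 || !(p.2 == 1))).map (·.1)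
  let ends := PySem.List.slice starts (some 1) none ++ [n]
  (starts.zip ends).map (fun p => PySem.List.pyRange p.1 p.2 1)

-- ===== PRECONDITION & SPEC =====
def Spec_slur_json_tg (is_slur : List Int) (out : List (List Int)) : Prop := out = slur_json_tg_alt is_slur
instance (is_slur : List Int) (out : List (List Int)) : Decidable (Spec_slur_json_tg is_slur out) := by unfold Spec_slur_json_tg; infer_instance

-- ===== CLAIM (what is proved, stated in full; the proofs are below) =====
def Claim_equal_slur_json_tg : Prop := ∀ (is_slur : List Int), Dom_slur_json_tg is_slur → Spec_slur_json_tg is_slur (slur_json_tg is_slur)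

-- ===== LEMMAS AND PROOFS =====

-- canonical grouping: cur is the group under construction, i the next index
def pvGo (cur : List Int) (i : Int) : List Int → List (List Int)
  | [] => [cur]
  | v :: vs => if v = 1 then pvGo (cur ++ [i]) (i+1) vs else cur :: pvGo [i] (i+1) vs

theorem pvA_inv (vs : List Int) : ∀ (re : List (List Int)) (cur : List Int) (i : Int),
    cur ≠ [] →
    (let st := (PySem.List.enumerate vs i).foldl pvStepA (re, cur);
     if st.2 ≠ [] then st.1 ++ [st.2] else st.1) = re ++ pvGo cur i vs := by
  induction vs with
  | nil => intro re cur i h; simp [PySem.List.enumerate_nil, pvGo, h]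
  | cons v vs ih =>
    intro re cur i h
    simp only [PySem.List.enumerate_cons, List.foldl_cons, pvGo]
    by_cases hv : v = 1
    · simp only [pvStepA, hv]
      simpa using ih re (cur ++ [i]) (i+1) (by simp)
    · have : pvStepA (re, cur) (i, v) = (re ++ [cur], [i]) := by
        simp [pvStepA, hv, h]
      rw [this]
      simp only [if_neg hv]
      rw [ih (re ++ [cur]) [i] (i+1) (by simp)]
      simp

-- the tail starts: indices i ≥ 1, so the 'i == 0' disjunct never fires
theorem pv_filter_shift (vs : List Int) : ∀ (i : Int), 1 ≤ i →
    (PySem.List.enumerate vs i).filter (fun p => p.1 == 0 || !(p.2 == 1))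
      = (PySem.List.enumerate vs i).filter (fun p => !(p.2 == 1)) := by
  induction vs with
  | nil => intro i _; simp [PySem.List.enumerate_nil]
  | cons v vs ih =>
    intro i hi
    have h0 : (i == 0) = false := by simp; omega
    simp only [PySem.List.enumerate_cons, List.filter_cons, h0, Bool.false_or]
    rw [ih (i+1) (by omega)]

def pvStarts (i : Int) (vs : List Int) : List Int :=
  ((PySem.List.enumerate vs i).filter (fun p => !(p.2 == 1))).map (·.1)

theorem pvB_core (vs : List Int) : ∀ (i c : Int), c ≤ i →
    ((c :: pvStarts i vs).zip ((pvStarts i vs) ++ [i + vs.length])).map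
        (fun p => PySem.List.pyRange p.1 p.2 1)
      = pvGo (PySem.List.pyRange c i 1) i vs := by
  induction vs with
  | nil =>
    intro i c _
    simp [pvStarts, PySem.List.enumerate_nil, pvGo]
  | cons v vs ih =>
    intro i c hc
    by_cases hv : v = 1
    · have hs : pvStarts i (v :: vs) = pvStarts (i+1) vs := by
        simp [pvStarts, PySem.List.enumerate_cons, hv]
      have hlen : i + ((v :: vs).length : Int) = (i+1) + vs.length := by
        simp; omega
      rw [hs, hlen, ih (i+1) c (by omega)]
      rw [PySem.List.pyRange_one_succ_right hc]
      simp [pvGo, hv]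
    · have hs : pvStarts i (v :: vs) = i :: pvStarts (i+1) vs := by
        simp [pvStarts, PySem.List.enumerate_cons, hv]
      have hlen : i + ((v :: vs).length : Int) = (i+1) + vs.length := by
        simp; omega
      rw [hs]
      simp only [List.zip_cons_cons, List.map_cons, List.cons_append]
      rw [hlen, ih (i+1) i (by omega)]
      simp [pvGo, hv, PySem.List.pyRange_one_singleton]

-- ===== VERDICT (by name: the statement is the Claim_ definition above) =====
theorem slur_json_tg_spec : Claim_equal_slur_json_tg := by
  intro is_slur _
  unfold Spec_slur_json_tg slur_json_tg slur_json_tg_alt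
  cases is_slur with
  | nil => simp [PySem.List.enumerate_nil]
  | cons v vs =>
    simp only
    -- A side
    have hstep : pvStepA ([], []) (0, v) = ([], [0]) := by
      by_cases hv : v = 1 <;> simp [pvStepA, hv]
    rw [PySem.List.enumerate_cons, List.foldl_cons, hstep]
    simp only [zero_add]
    rw [pvA_inv vs [] [0] 1 (by simp)]
    -- B side
    have hf : (((0 : Int), v).1 == 0 || !(((0 : Int), v).2 == 1)) = true := by simp
    rw [List.filter_cons, if_pos hf, pv_filter_shift vs 1 (by omega)]
    simp only [List.map_cons, PySem.List.slice_from_one, List.tail_cons]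
    have := pvB_core vs 1 0 (by omega)
    simp only [pvStarts] at this
    have hlen : ((v :: vs).length : Int) = 1 + (vs.length : Int) := by simp; omega
    rw [hlen, this]
    rw [show PySem.List.pyRange 0 1 1 = [0] from PySem.List.pyRange_one_singleton 0]
    simp
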